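-- pv_equiv track=rewrite | github.com/amirnachum15/nand_ex10 | JackTokenizer.py | _split_according_to_char
-- ===== SOURCE A (Python) =====
-- def _split_according_to_char(buffer, char):
--     """
--     this function gets a list, and splits the buffer according to the char
--     saving the char, and deleting (like in regular split)
--     """
--     #checking if the char appears in the buffer
--     char_occur = False
--     for value in buffer:
--         if char in value:
--             char_occur = True
--             break
--     if not char_occur:
--         return buffer
--     tmp = []
--     for buf in buffer:
--
--         if char in buf:
--             #we need to split
--             splitted = buf.split(char)
--             for word in splitted:
--                 tmp.append(word) if word != "" else None
--                 tmp.append(char)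
--             tmp = tmp[:-1]
--         else:
--             tmp.append(buf)
--     return tmp
-- ===== SOURCE B (Python) =====
-- def _scan_pieces(buf, char):
--     """Split buf on char keeping delimiter tokens, dropping empty words."""
--     pieces = []
--     current = ""
--     i = 0
--     n = len(char)
--     while i < len(buf):
--         if buf.startswith(char, i):
--             if current:
--                 pieces.append(current)
--             pieces.append(char)
--             current = ""
--             i += n
--         else:
--             current += buf[i]
--             i += 1
--     if current:
--         pieces.append(current)
--     return pieces
--
--
-- def _split_according_to_char(buffer, char):
--     if char == "" or not any(char in v for v in buffer):
--         return buffer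
--     out = []
--     for buf in buffer:
--         if char not in buf:
--             out.append(buf)
--         else:
--             out.extend(_scan_pieces(buf, char))
--     return out
-- ===== Notes on version B (the rewrite author's own statement) =====
-- stated objective: alternative
-- what changed: B replaces A's per-element str.split + interleave-char-after-every-word + global trailing trim with a single left-to-right character scan per element that flushes a current-word accumulator and emits the delimiter at each occurrence, and B returns the buffer unchanged where A raises on an empty delimiter.
-- crash fix: On char = '' with a nonempty buffer A raises ValueError (empty separator passed to str.split); B returns buffer unchanged. — e.g. on _split_according_to_char(["a"], ""): A raises ValueError, B returns ["a"]
import Mathlib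
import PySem

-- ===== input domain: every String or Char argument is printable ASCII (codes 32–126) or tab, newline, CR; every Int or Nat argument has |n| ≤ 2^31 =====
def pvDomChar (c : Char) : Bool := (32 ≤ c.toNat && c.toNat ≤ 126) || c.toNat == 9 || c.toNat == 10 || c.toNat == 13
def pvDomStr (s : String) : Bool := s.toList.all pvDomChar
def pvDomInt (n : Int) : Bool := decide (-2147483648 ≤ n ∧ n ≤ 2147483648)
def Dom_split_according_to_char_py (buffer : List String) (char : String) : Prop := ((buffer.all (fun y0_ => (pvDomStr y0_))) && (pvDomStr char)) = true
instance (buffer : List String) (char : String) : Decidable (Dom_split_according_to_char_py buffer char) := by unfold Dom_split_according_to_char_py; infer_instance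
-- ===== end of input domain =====

-- B replaces A's split+interleave+global-trim with a single left-to-right scan per
-- buffer element that jumps over delimiter occurrences (alternative decomposition,
-- same cost); B additionally returns buffer unchanged where A raises on char = "".

-- ===== PORT A =====
def split_according_to_char_py (buffer : List String) (char : String) : List String :=
  -- the char_occur loop with break = any
  if (buffer.any (fun value => PySem.Str.isIn char value)) = false then buffer
  else
    buffer.foldl (fun tmp buf =>
      if PySem.Str.isIn char buf then
        -- splitted = buf.split(char); raises iff char = "" (excluded by Pre_), so .getD [] is dead code
        (((PySem.Str.split? buf char).getD []).foldl (fun t word =>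
          (if word ≠ "" then t ++ [word] else t) ++ [char]) tmp).dropLast
      else tmp ++ [buf]) []

-- ===== PORT B =====
-- _scan_pieces: scan buf left to right; on a delimiter occurrence flush the current
-- word (if nonempty) and emit char, else accumulate the character into current.
def pvScanPieces (sep : List Char) (cs : List Char) (current : List Char) : List String :=
  if h : sep ≠ [] ∧ sep <+: cs then
    (if current ≠ [] then [String.ofList current] else []) ++
      String.ofList sep :: pvScanPieces sep (cs.drop sep.length) []
  else
    match cs with
    | [] => if current ≠ [] then [String.ofList current] else []
    | c :: rest => pvScanPieces sep rest (current ++ [c])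
termination_by cs.length
decreasing_by
  · have h1 : 1 ≤ sep.length := List.length_pos_iff.mpr h.1
    have h2 : sep.length ≤ cs.length := h.2.length_le
    simp only [List.length_drop]; omega
  · simp

def split_according_to_char_py_alt (buffer : List String) (char : String) : List String :=
  if (char == "") || !(buffer.any (fun v => PySem.Str.isIn char v)) then buffer
  else
    buffer.foldl (fun out buf =>
      if !(PySem.Str.isIn char buf) then out ++ [buf]
      else out ++ pvScanPieces char.toList buf.toList []) []

-- ===== PRECONDITION & SPEC =====
-- Pre_ excludes exactly the inputs where A raises: char = "" with a nonempty buffer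
-- ("".split("") is a ValueError; with buffer = [] the split is never reached).
def Pre_split_according_to_char_py (buffer : List String) (char : String) : Prop :=
  char ≠ "" ∨ buffer = []
instance (buffer : List String) (char : String) : Decidable (Pre_split_according_to_char_py buffer char) := by unfold Pre_split_according_to_char_py; infer_instance

def pvWitness_split_according_to_char_py : List String × String := (["a,b", "", ",x,"], ",")

-- A raises ValueError (empty separator) whenever char = "" and buffer is nonempty; B returns buffer unchanged there.
def Raises_split_according_to_char_py (buffer : List String) (char : String) : Prop :=
  char = "" ∧ buffer ≠ []
instance (buffer : List String) (char : String) : Decidable (Raises_split_according_to_char_py buffer char) := by unfold Raises_split_according_to_char_py; infer_instance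
def pvRaiseWitness_split_according_to_char_py : List String × String := (["a"], "")
def pvRaiseWitnessOut_split_according_to_char_py : List String := ["a"]

def Spec_split_according_to_char_py (buffer : List String) (char : String) (out : List String) : Prop := out = split_according_to_char_py_alt buffer char
instance (buffer : List String) (char : String) (out : List String) : Decidable (Spec_split_according_to_char_py buffer char out) := by unfold Spec_split_according_to_char_py; infer_instance

-- ===== CLAIM (what is proved, stated in full; the proofs are below) =====
def Claim_equal_split_according_to_char_py : Prop := ∀ (buffer : List String) (char : String), Dom_split_according_to_char_py buffer char → Pre_split_according_to_char_py buffer char → Spec_split_according_to_char_py buffer char (split_according_to_char_py buffer char)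

def Claim_raises_split_according_to_char_py : Prop := (∀ (buffer : List String) (char : String), Dom_split_according_to_char_py buffer char → Raises_split_according_to_char_py buffer char → ¬ Pre_split_according_to_char_py buffer char) ∧ (Dom_split_according_to_char_py (pvRaiseWitness_split_according_to_char_py.1) (pvRaiseWitness_split_according_to_char_py.2) ∧ Raises_split_according_to_char_py (pvRaiseWitness_split_according_to_char_py.1) (pvRaiseWitness_split_according_to_char_py.2) ∧ split_according_to_char_py_alt (pvRaiseWitness_split_according_to_char_py.1) (pvRaiseWitness_split_according_to_char_py.2) = pvRaiseWitnessOut_split_according_to_char_py)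

-- ===== LEMMAS AND PROOFS =====

-- clean recursive characterisation of Python's str.split (nonempty separator)
def pvSplit (sep : List Char) (cs : List Char) : List (List Char) :=
  if h : sep ≠ [] ∧ sep <+: cs then [] :: pvSplit sep (cs.drop sep.length)
  else
    match cs with
    | [] => [[]]
    | c :: rest => (pvSplit sep rest).modifyHead (c :: ·)
termination_by cs.length
decreasing_by
  · have h1 : 1 ≤ sep.length := List.length_pos_iff.mpr h.1
    have h2 : sep.length ≤ cs.length := h.2.length_le
    simp only [List.length_drop]; omega
  · simp

theorem pvSplit_ne_nil (sep cs : List Char) : pvSplit sep cs ≠ [] := by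
  induction cs using pvSplit.induct sep with
  | case1 cs h ih => rw [pvSplit, dif_pos h]; simp
  | case2 h => rw [pvSplit, dif_neg h]; simp
  | case3 c rest h ih =>
    rw [pvSplit, dif_neg h]
    cases hq : pvSplit sep rest with
    | nil => exact absurd hq ih
    | cons a l => simp [hq]

theorem pvModifyHead_nil_append (l : List (List Char)) :
    l.modifyHead (fun p => ([] : List Char) ++ p) = l := by
  cases l <;> simp

theorem pvModifyHead_id (l : List (List Char)) : l.modifyHead (fun p => p) = l := by
  cases l <;> simp

theorem pvGo_eq (sep : List Char) (hsep : sep ≠ []) :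
    ∀ (fuel : Nat) (l cur : List Char) (acc : List (List Char)), l.length < fuel →
      PySem.Chars.splitOn.go sep fuel l cur acc
        = acc.reverse ++ (pvSplit sep l).modifyHead (cur.reverse ++ ·) := by
  intro fuel
  induction fuel with
  | zero => intro l cur acc h; omega
  | succ fuel ih =>
    intro l cur acc h
    match l with
    | [] =>
      rw [PySem.Chars.splitOn.go.eq_def]
      rw [pvSplit]
      simp [hsep]
    | c :: rest =>
      rw [PySem.Chars.splitOn.go.eq_def]
      simp only []
      rw [pvSplit]
      by_cases hp : sep <+: (c :: rest)
      · have hb : sep.isPrefixOf (c :: rest) = true := List.isPrefixOf_iff_prefix.mpr hp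
        rw [if_pos hb, dif_pos ⟨hsep, hp⟩]
        have hlt : (List.drop sep.length (c :: rest)).length < fuel := by
          have h1 : 1 ≤ sep.length := List.length_pos_iff.mpr hsep
          simp only [List.length_drop]
          simp only [List.length_cons] at h ⊢
          omega
        rw [ih _ [] _ hlt]
        simp [pvModifyHead_id]
      · have hb : sep.isPrefixOf (c :: rest) = false := by
          by_contra hcon
          exact hp (List.isPrefixOf_iff_prefix.mp (by simpa using hcon))
        rw [if_neg (by simp [hb]), dif_neg (by tauto)]
        have hlt : rest.length < fuel := by simp only [List.length_cons] at h; omega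
        rw [ih rest (c :: cur) acc hlt]
        rw [List.modifyHead_modifyHead]
        congr 1
        congr 1
        funext p
        simp

theorem pvSplitOn_eq (sep cs : List Char) (hsep : sep ≠ []) :
    PySem.Chars.splitOn cs sep = pvSplit sep cs := by
  unfold PySem.Chars.splitOn
  rw [pvGo_eq sep hsep (cs.length + 1) cs [] [] (by omega)]
  simp [pvModifyHead_id]

-- the per-bucket result, as a function of the split pieces
def pvEmit (w : List Char) : List String := if w ≠ [] then [String.ofList w] else []

def pvG (char : String) : List (List Char) → List String
  | [] => []
  | [p] => pvEmit p
  | p :: q :: ps => pvEmit p ++ char :: pvG char (q :: ps)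

theorem pvScan_eq_G (char : String) (cs cur : List Char) :
    pvScanPieces char.toList cs cur
      = pvG char ((pvSplit char.toList cs).modifyHead (cur ++ ·)) := by
  induction cs, cur using pvScanPieces.induct char.toList with
  | case1 cs cur h ih =>
    rw [pvScanPieces, dif_pos h, pvSplit, dif_pos h]
    obtain ⟨q, ps, hq⟩ := List.exists_cons_of_ne_nil (pvSplit_ne_nil char.toList (cs.drop char.toList.length))
    rw [ih, hq]
    simp [pvG, pvEmit, List.modifyHead]
  | case2 cur h hcur =>
    rw [pvScanPieces, dif_neg h, pvSplit, dif_neg h]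
    simp [pvG, pvEmit, List.modifyHead, hcur]
  | case3 cur h hcur =>
    rw [pvScanPieces, dif_neg h, pvSplit, dif_neg h]
    simp only [not_not] at hcur
    simp [pvG, pvEmit, List.modifyHead, hcur]
  | case4 cur c rest h ih =>
    rw [pvScanPieces, dif_neg h, pvSplit, dif_neg h]
    simp only []
    rw [ih, List.modifyHead_modifyHead]
    congr 2
    funext p
    simp

theorem pvFlatMap_ne_nil (char : String) (ps : List (List Char)) (h : ps ≠ []) :
    (ps.map String.ofList).flatMap (fun w => (if w ≠ "" then [w] else []) ++ [char]) ≠ [] := by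
  match ps with
  | p :: ps' => simp

theorem pvFlat_eq_G (char : String) :
    ∀ (ps : List (List Char)), ps ≠ [] →
      ((ps.map String.ofList).flatMap
        (fun w => (if w ≠ "" then [w] else []) ++ [char])).dropLast = pvG char ps := by
  intro ps
  induction ps with
  | nil => intro h; exact absurd rfl h
  | cons p ps ih =>
    intro _
    match ps, ih with
    | [], _ =>
      simp only [List.map_cons, List.map_nil, List.flatMap_cons, List.flatMap_nil,
        List.append_nil, pvG, pvEmit]
      rw [List.dropLast_concat]
      by_cases hp : p = []
      · simp [hp]
      · rw [if_pos (by simpa [String.ofList_eq_empty_iff] using hp), if_pos hp]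
    | q :: ps', ih =>
      have hne := pvFlatMap_ne_nil char (q :: ps') (by simp)
      rw [List.map_cons, List.flatMap_cons,
        List.dropLast_append_of_ne_nil hne, ih (by simp)]
      simp only [pvG, pvEmit]
      by_cases hp : p = []
      · simp [hp]
      · rw [if_pos (by simpa [String.ofList_eq_empty_iff] using hp), if_pos hp]
        simp

-- A's inner foldl is an append of blocks
theorem pvInnerFold (char : String) (splitted : List String) (tmp : List String) :
    splitted.foldl (fun t word => (if word ≠ "" then t ++ [word] else t) ++ [char]) tmp
      = tmp ++ splitted.flatMap (fun w => (if w ≠ "" then [w] else []) ++ [char]) := by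
  have hfun : (fun (t : List String) (word : String) =>
      (if word ≠ "" then t ++ [word] else t) ++ [char])
      = (fun t word => t ++ ((if word ≠ "" then [word] else []) ++ [char])) := by
    funext t word
    split <;> simp
  rw [hfun, PySem.List.foldl_append_eq_flatMap]

-- the per-bucket equality: A's split/interleave/trim = B's scan
theorem pvBucket_eq (char : String) (hc : char ≠ "") (buf : String) (tmp : List String) :
    ((((PySem.Str.split? buf char).getD []).foldl
        (fun t word => (if word ≠ "" then t ++ [word] else t) ++ [char]) tmp).dropLast : List String)
      = tmp ++ pvScanPieces char.toList buf.toList [] := by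
  have hcl : char.toList ≠ [] := by
    intro h
    apply hc
    have h2 := congrArg String.ofList h
    simpa using h2
  have hsplit : (PySem.Str.split? buf char).getD []
      = (pvSplit char.toList buf.toList).map String.ofList := by
    unfold PySem.Str.split? PySem.Chars.split?
    rw [if_neg (by simpa using hcl)]
    simp [pvSplitOn_eq _ _ hcl]
  rw [hsplit, pvInnerFold]
  rw [List.dropLast_append_of_ne_nil (pvFlatMap_ne_nil char _ (pvSplit_ne_nil _ _))]
  rw [pvFlat_eq_G char _ (pvSplit_ne_nil _ _)]
  rw [pvScan_eq_G char, pvModifyHead_nil_append]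

-- ===== VERDICT (by name: the statement is the Claim_ definition above) =====
theorem split_according_to_char_py_spec : Claim_equal_split_according_to_char_py := by
  intro buffer char _ hpre
  unfold Spec_split_according_to_char_py
  unfold split_according_to_char_py split_according_to_char_py_alt
  by_cases hc : char = ""
  · have hb : buffer = [] := by
      rcases hpre with h | h
      · exact absurd hc h
      · exact h
    subst hb; simp
  · have hbeq : (char == "") = false := by simpa using hc
    rw [hbeq]
    simp only [Bool.false_or]
    cases hany : buffer.any (fun v => PySem.Str.isIn char v) with
    | true =>
      rw [if_neg (by decide), if_neg (by decide)]
      apply PySem.List.foldl_congr_mem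
      intro acc buf _
      cases hin : PySem.Str.isIn char buf with
      | true =>
        rw [if_pos rfl, if_neg (by decide)]
        exact pvBucket_eq char hc buf acc
      | false =>
        rw [if_neg (by decide), if_pos (by decide)]
    | false =>
      rw [if_pos rfl, if_pos (by decide)]

@[simp]
theorem split_according_to_char_py_raises : Claim_raises_split_according_to_char_py := by
  unfold Claim_raises_split_according_to_char_py
  constructor
  · intro buffer char _ hr hpre
    rcases hpre with h | h
    · exact h hr.1
    · exact hr.2 h
  · decide
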